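-- pv_equiv track=rewrite | github.com/MrOrioleCashback/snippets | Checkio Weak Point.py | weak_point
-- ===== SOURCE A (Python) =====
-- def weak_point(matrix):
--     """
--     check for lowest row and column in a square matrix and return coordinates
--     """
--     answer = [0,0]
--
--     for index, row in enumerate(matrix):        #check lowest row and store result
--         if sum(row) < sum(matrix[answer[0]]):
--             answer[0] = index
--
--     matrix = list(zip(*matrix))                 #zip!
--
--     for index, row in enumerate(matrix):        #check lowest column and store result
--         if sum(row) < sum(matrix[answer[1]]):
--             answer[1] = index
--
--     return answer
-- ===== SOURCE B (Python) =====
-- def weak_point(matrix):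
--     """Pick the weakest row/column by stably sorting indices by their line sums."""
--     def weakest(rows):
--         order = sorted(range(len(rows)), key=lambda i: sum(rows[i]))
--         return order[0] if order else 0
--     return [weakest(matrix), weakest(list(zip(*matrix)))]
-- ===== Notes on version B (the rewrite author's own statement) =====
-- stated objective: alternative
-- what changed: B replaces A's two running-best comparison loops (with repeated re-summing of the current best line) by stably sorting the row indices and the column indices by their line sums and taking the head of each sort order, which yields the first minimal index by sort stability.
import Mathlib
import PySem

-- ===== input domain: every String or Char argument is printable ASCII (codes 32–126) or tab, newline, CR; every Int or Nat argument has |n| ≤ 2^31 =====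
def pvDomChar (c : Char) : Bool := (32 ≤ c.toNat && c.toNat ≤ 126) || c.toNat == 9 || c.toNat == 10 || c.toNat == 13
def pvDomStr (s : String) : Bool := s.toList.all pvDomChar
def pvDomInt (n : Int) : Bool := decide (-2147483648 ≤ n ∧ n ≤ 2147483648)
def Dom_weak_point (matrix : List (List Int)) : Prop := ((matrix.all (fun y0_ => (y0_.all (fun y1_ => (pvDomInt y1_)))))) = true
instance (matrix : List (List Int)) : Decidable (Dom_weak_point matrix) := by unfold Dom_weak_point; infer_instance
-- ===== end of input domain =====

-- B replaces A's two running-best scans by stably sorting the row/column indices by their sums and taking the head of each order; objective: alternative.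

-- ===== PORT A =====
-- exact port of the builtin list(zip(*m)): the columns j for j < min row length (no rows, or an empty row, gives [])
def pyZipStar (m : List (List Int)) : List (List Int) :=
  let k : Nat := (PySem.List.min? (m.map List.length) (fun x => x)).getD 0
  (List.range k).map (fun j => m.map (fun r => r.getD j 0))

-- literal port of A; matrix[answer[0]] is ported as pyGetD (the index held in the accumulator is always in range)
def weak_point (matrix : List (List Int)) : List Int :=
  let a0 : Int := (PySem.List.enumerate matrix).foldl
      (fun b p => if p.2.sum < (PySem.List.pyGetD matrix b []).sum then p.1 else b) 0
  let m2 := pyZipStar matrix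
  let a1 : Int := (PySem.List.enumerate m2).foldl
      (fun b p => if p.2.sum < (PySem.List.pyGetD m2 b []).sum then p.1 else b) 0
  [a0, a1]

-- ===== PORT B =====
-- sorted(range(len(rows)), key=lambda i: sum(rows[i])); order[0] if order else 0
def weakestIdx (rows : List (List Int)) : Int :=
  let order := PySem.List.sorted (PySem.List.pyRange 0 (PySem.List.len rows))
      (fun i => (PySem.List.pyGetD rows i []).sum) false
  match order with
  | [] => 0
  | i :: _ => i

def weak_point_alt (matrix : List (List Int)) : List Int :=
  [weakestIdx matrix, weakestIdx (pyZipStar matrix)]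

-- ===== PRECONDITION & SPEC =====
def Spec_weak_point (matrix : List (List Int)) (out : List Int) : Prop := out = weak_point_alt matrix
instance (matrix : List (List Int)) (out : List Int) : Decidable (Spec_weak_point matrix out) := by unfold Spec_weak_point; infer_instance

-- ===== CLAIM (what is proved, stated in full; the proofs are below) =====
def Claim_equal_weak_point : Prop := ∀ (matrix : List (List Int)), Dom_weak_point matrix → Spec_weak_point matrix (weak_point matrix)

-- ===== LEMMAS AND PROOFS =====

-- value of the running minimum (minv) and the index of the first minimal element (fargmin)
def minv : List Int → Int
  | [] => 0
  | x :: xs => xs.foldl min x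

def fargmin : List Int → Nat
  | [] => 0
  | [_] => 0
  | x :: y :: t => if x ≤ minv (y :: t) then 0 else fargmin (y :: t) + 1

lemma minv_cons_cons (x y : Int) (t : List Int) :
    minv (x :: y :: t) = min x (minv (y :: t)) := by
  simp [minv, List.foldl_assoc]

lemma minv_append_singleton (p : List Int) (hp : p ≠ []) (x : Int) :
    minv (p ++ [x]) = min (minv p) x := by
  cases p with
  | nil => simp at hp
  | cons a t => simp [minv, List.foldl_append]

lemma fargmin_lt_length (s : List Int) (hs : s ≠ []) : fargmin s < s.length := by
  induction s with
  | nil => simp at hs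
  | cons x xs ih =>
    cases xs with
    | nil => simp [fargmin]
    | cons y t =>
      simp only [fargmin]
      split_ifs
      · simp
      · have := ih (by simp)
        simpa using Nat.succ_lt_succ this

lemma getD_fargmin (s : List Int) (hs : s ≠ []) (d : Int) :
    s.getD (fargmin s) d = minv s := by
  induction s with
  | nil => simp at hs
  | cons x xs ih =>
    cases xs with
    | nil => simp [fargmin, minv]
    | cons y t =>
      rw [minv_cons_cons]
      simp only [fargmin]
      split_ifs with h
      · simp [min_eq_left h]
      · have := ih (by simp)
        simp only [List.getD_cons_succ, this]
        exact (min_eq_right (le_of_lt (not_le.mp h))).symm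

lemma fargmin_append_singleton (p : List Int) (hp : p ≠ []) (x : Int) :
    fargmin (p ++ [x]) = if x < minv p then p.length else fargmin p := by
  induction p with
  | nil => simp at hp
  | cons a t ih =>
    cases t with
    | nil =>
      simp only [List.cons_append, List.nil_append, fargmin, minv, List.foldl]
      split_ifs <;> simp_all
      omega
    | cons b u =>
      have hne : (b :: u) ≠ [] := by simp
      have h1 : ((a :: b :: u) ++ [x]) = a :: b :: (u ++ [x]) := by simp
      rw [h1]
      simp only [fargmin]
      have h2 : (b : Int) :: (u ++ [x]) = (b :: u) ++ [x] := by simp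
      rw [h2, minv_append_singleton _ hne x, ih hne, minv_cons_cons]
      have hlen : ((b :: u) ++ [x]).length = u.length + 2 := by simp
      simp only [List.length_cons, min_def]
      split_ifs <;> omega

-- A's loop, generalized: after a nonempty prefix p has been processed the accumulator is fargmin of p's sums
lemma foldA_aux {α : Type} (f : α → Int) (d : α) (l : List α) :
    ∀ (t p : List α), l = p ++ t → p ≠ [] →
      (PySem.List.enumerate t (p.length : Int)).foldl
        (fun b q => if f q.2 < f (PySem.List.pyGetD l b d) then q.1 else b)
        ((fargmin (p.map f) : Nat) : Int)
      = ((fargmin (l.map f) : Nat) : Int) := by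
  intro t
  induction t with
  | nil =>
    intro p hl hp
    simp [PySem.List.enumerate, hl]
  | cons x xs ih =>
    intro p hl hp
    have hpm : p.map f ≠ [] := by simpa using hp
    have hb : fargmin (p.map f) < p.length := by
      simpa using fargmin_lt_length (p.map f) hpm
    have hget : PySem.List.pyGetD l ((fargmin (p.map f) : Nat) : Int) d
        = p.getD (fargmin (p.map f)) d := by
      rw [PySem.List.pyGetD_natCast]
      rw [hl]
      exact List.getD_append _ _ _ _ hb
    have hfget : f (PySem.List.pyGetD l ((fargmin (p.map f) : Nat) : Int) d)
        = minv (p.map f) := by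
      have hmap : (p.map f).getD (fargmin (p.map f)) (f d)
          = f (p.getD (fargmin (p.map f)) d) := by simp
      rw [hget, ← hmap, getD_fargmin _ hpm]
    rw [PySem.List.enumerate_cons, List.foldl_cons]
    have hstep : (if f x < f (PySem.List.pyGetD l ((fargmin (p.map f) : Nat) : Int) d)
          then (p.length : Int) else ((fargmin (p.map f) : Nat) : Int))
        = ((fargmin ((p ++ [x]).map f) : Nat) : Int) := by
      rw [hfget]
      simp only [List.map_append, List.map_cons, List.map_nil]
      rw [fargmin_append_singleton _ hpm (f x)]
      by_cases hc : f x < minv (p.map f) <;> simp [hc]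
    rw [hstep]
    have := ih (p ++ [x]) (by simp [hl]) (by simp)
    simpa using this

-- A's whole loop computes the first argmin of the sums
lemma foldA {α : Type} (f : α → Int) (d : α) (l : List α) :
    (PySem.List.enumerate l).foldl
        (fun b q => if f q.2 < f (PySem.List.pyGetD l b d) then q.1 else b) 0
      = ((fargmin (l.map f) : Nat) : Int) := by
  cases l with
  | nil => simp [PySem.List.enumerate, fargmin]
  | cons x xs =>
    rw [PySem.List.enumerate_cons, List.foldl_cons]
    have h0 : PySem.List.pyGetD (x :: xs) (0 : Int) d = x := by
      simp [PySem.List.pyGetD]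
    have : (if f x < f (PySem.List.pyGetD (x :: xs) (0 : Int) d) then (0 : Int) else 0)
        = ((fargmin ((([x] : List α)).map f) : Nat) : Int) := by
      simp [h0, fargmin]
    rw [this]
    have := foldA_aux f d (x :: xs) xs [x] (by simp) (by simp)
    simpa using this

-- B's side: the head of the stable insertion sort is the FIRST element with minimal key
lemma sorted_append_singleton {α : Type} (key : α → Int) (l : List α) (x : α) :
    PySem.List.sorted (l ++ [x]) key false
      = PySem.List.insertBy (fun a b => decide (key a < key b)) x
          (PySem.List.sorted l key false) := by
  rw [PySem.List.sorted_eq_foldl_insertBy, PySem.List.sorted_eq_foldl_insertBy,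
    List.foldl_append]
  rfl

lemma headD_sorted_fargmin {α : Type} (key : α → Int) (d : α) (l : List α) (hl : l ≠ []) :
    (PySem.List.sorted l key false).headD d = l.getD (fargmin (l.map key)) d := by
  induction l using List.reverseRecOn with
  | nil => simp at hl
  | append_singleton p x ih =>
    by_cases hp : p = []
    · subst hp
      simp [PySem.List.sorted, PySem.List.insertBy, fargmin]
    · have hpm : p.map key ≠ [] := by simpa using hp
      rw [sorted_append_singleton]
      obtain ⟨h, t, hs⟩ : ∃ h t, PySem.List.sorted p key false = h :: t := by
        cases hsp : PySem.List.sorted p key false with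
        | nil => exact absurd ((PySem.List.sorted_eq_nil_iff p key false).mp hsp) hp
        | cons h t => exact ⟨h, t, rfl⟩
      have hh : h = p.getD (fargmin (p.map key)) d := by
        have := ih hp
        rw [hs] at this
        simpa using this
      have hkey : key h = minv (p.map key) := by
        have hmap : (p.map key).getD (fargmin (p.map key)) (key d)
            = key (p.getD (fargmin (p.map key)) d) := by simp
        rw [hh, ← hmap, getD_fargmin _ hpm]
      have hins : PySem.List.insertBy (fun a b => decide (key a < key b)) x (h :: t)
          = if key x < key h then x :: h :: t
            else h :: PySem.List.insertBy (fun a b => decide (key a < key b)) x t := by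
        simp [PySem.List.insertBy]
      rw [hs, hins]
      rw [List.map_append, List.map_cons, List.map_nil,
        fargmin_append_singleton _ hpm (key x), hkey]
      by_cases hc : key x < minv (p.map key)
      · rw [if_pos hc, if_pos hc]
        rw [List.getD_eq_getElem _ _ (by simp)]
        simp
      · rw [if_neg hc, if_neg hc]
        have hb : fargmin (p.map key) < p.length := by
          simpa using fargmin_lt_length (p.map key) hpm
        rw [List.getD_append _ _ _ _ hb, ← hh]
        simp

-- B's weakestIdx is the first argmin of the sums (including the empty case)
lemma weakestIdx_eq (rows : List (List Int)) :
    weakestIdx rows = ((fargmin (rows.map List.sum) : Nat) : Int) := by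
  by_cases h : rows = []
  · subst h; rfl
  · unfold weakestIdx
    have hmap : (PySem.List.pyRange 0 (PySem.List.len rows)).map
          (fun i => (PySem.List.pyGetD rows i []).sum)
        = rows.map List.sum := by
      conv_rhs => rw [← PySem.List.map_pyGetD_pyRange_zero rows ([] : List Int)]
      rw [List.map_map]
      rfl
    have hlen : PySem.List.len rows = ((rows.length : Nat) : Int) := rfl
    have hne : PySem.List.pyRange 0 (PySem.List.len rows) ≠ [] := by
      rw [hlen, PySem.List.pyRange_zero_natCast]
      simp [List.range_eq_nil, h]
    cases hs : PySem.List.sorted (PySem.List.pyRange 0 (PySem.List.len rows))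
        (fun i => (PySem.List.pyGetD rows i []).sum) false with
    | nil => exact absurd ((PySem.List.sorted_eq_nil_iff _ _ _).mp hs) hne
    | cons i t =>
      have := headD_sorted_fargmin (fun i => (PySem.List.pyGetD rows i []).sum) 0 _ hne
      rw [hs] at this
      simp only [List.headD_cons] at this
      rw [this, hmap]
      have hb : fargmin (rows.map List.sum) < rows.length := by
        have : rows.map List.sum ≠ [] := by simpa using h
        simpa using fargmin_lt_length _ this
      rw [hlen, PySem.List.pyRange_zero_natCast]
      rw [List.getD_eq_getElem _ _ (by simpa using hb)]
      simp

-- ===== VERDICT (by name: the statement is the Claim_ definition above) =====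
theorem weak_point_spec : Claim_equal_weak_point := by
  intro matrix _
  show weak_point matrix = weak_point_alt matrix
  simp only [weak_point, weak_point_alt]
  rw [foldA List.sum [] matrix, foldA List.sum [] (pyZipStar matrix),
    weakestIdx_eq matrix, weakestIdx_eq (pyZipStar matrix)]
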